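-- pv_equiv track=rewrite | github.com/krizzo101/master_root | libs/opsvi-asea/opsvi_asea/development/autonomous_systems/validation_systems/fresh_agent_test_validator.py | _extract_claimed_actions
-- ===== SOURCE A (Python) =====
-- from typing import Dict, List, Any
--
-- def _extract_claimed_actions(agent_response: str) -> List[str]:
--     """Extract actions the agent claimed to perform"""
--
--     claimed_actions = []
--
--     # Look for action indicators
--     action_patterns = [
--         "i loaded",
--         "i used",
--         "i applied",
--         "i analyzed",
--         "i executed",
--         "i ran",
--         "i performed",
--         "i implemented",
--         "i called",
--         "i invoked",
--     ]
--
--     response_lower = agent_response.lower()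
--
--     for pattern in action_patterns:
--         if pattern in response_lower:
--             # Extract the sentence containing the action
--             sentences = agent_response.split(".")
--             for sentence in sentences:
--                 if pattern in sentence.lower():
--                     claimed_actions.append(sentence.strip())
--
--     return claimed_actions
-- ===== SOURCE B (Python) =====
-- from typing import Dict, List, Any
--
-- def _extract_claimed_actions(agent_response: str) -> List[str]:
--     """Extract actions the agent claimed to perform"""
--
--     action_patterns = [
--         "i loaded",
--         "i used",
--         "i applied",
--         "i analyzed",
--         "i executed",
--         "i ran",
--         "i performed",
--         "i implemented",
--         "i called",
--         "i invoked",
--     ]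
--
--     # One sentence-major pass: split and lowercase each sentence once,
--     # recording (pattern, stripped sentence) hits in order.
--     pairs = []
--     for sentence in agent_response.split("."):
--         low = sentence.lower()
--         for pattern in action_patterns:
--             if pattern in low:
--                 pairs.append((pattern, sentence.strip()))
--
--     # Group the hits per pattern, then emit in pattern order
--     # (pattern-major, sentence order and duplicates preserved).
--     index = {}
--     for pattern, stripped in pairs:
--         index.setdefault(pattern, []).append(stripped)
--
--     out = []
--     for pattern in action_patterns:
--         out.extend(index.get(pattern, []))
--     return out
-- ===== Notes on version B (the rewrite author's own statement) =====
-- stated objective: alternative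
-- what changed: B splits the response and lowercases each sentence exactly once in a single sentence-major pass, groups the (pattern, stripped sentence) hits into a per-pattern index dict, and then emits the groups in pattern order, instead of A's pattern-major loop that re-splits the response and re-scans (and re-lowercases) every sentence for each matched pattern.
import Mathlib
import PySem

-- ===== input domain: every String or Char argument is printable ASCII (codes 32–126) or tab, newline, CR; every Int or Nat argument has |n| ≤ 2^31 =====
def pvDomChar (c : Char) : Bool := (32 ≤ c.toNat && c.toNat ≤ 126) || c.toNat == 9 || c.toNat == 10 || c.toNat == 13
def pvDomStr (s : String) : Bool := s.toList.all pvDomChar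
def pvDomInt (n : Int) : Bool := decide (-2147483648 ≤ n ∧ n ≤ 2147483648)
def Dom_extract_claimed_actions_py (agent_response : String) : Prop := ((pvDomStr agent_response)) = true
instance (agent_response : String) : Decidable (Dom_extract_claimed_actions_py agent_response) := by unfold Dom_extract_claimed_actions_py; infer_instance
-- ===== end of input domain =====

-- B replaces A's pattern-major re-splitting/re-scanning by one sentence-major pass that groups matches
-- into a per-pattern index, then emits them in pattern order (alternative decomposition, same results).

-- ===== PORT A =====
def extract_claimed_actions_py (agent_response : String) : List String :=
  let action_patterns : List String :=
    ["i loaded", "i used", "i applied", "i analyzed", "i executed",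
     "i ran", "i performed", "i implemented", "i called", "i invoked"]
  let response_lower := PySem.Str.lower agent_response
  action_patterns.foldl
    (fun claimed_actions pattern =>
      if PySem.Str.isIn pattern response_lower then
        let sentences := (PySem.Str.split? agent_response ".").getD []
        sentences.foldl
          (fun acc sentence =>
            if PySem.Str.isIn pattern (PySem.Str.lower sentence) then
              acc ++ [PySem.Str.strip sentence]
            else acc)
          claimed_actions
      else claimed_actions)
    []

-- ===== PORT B =====
def extract_claimed_actions_py_alt (agent_response : String) : List String :=
  let action_patterns : List String :=
    ["i loaded", "i used", "i applied", "i analyzed", "i executed",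
     "i ran", "i performed", "i implemented", "i called", "i invoked"]
  let sentences := (PySem.Str.split? agent_response ".").getD []
  let pairs := sentences.foldl
    (fun pairs sentence =>
      let low := PySem.Str.lower sentence
      action_patterns.foldl
        (fun pairs pattern =>
          if PySem.Str.isIn pattern low then
            pairs ++ [(pattern, PySem.Str.strip sentence)]
          else pairs)
        pairs)
    []
  let index := pairs.foldl (fun d q => d.modify q.1 [] (fun v => v ++ [q.2])) PySem.Dict.empty
  action_patterns.foldl (fun out pattern => out ++ index.getD pattern []) []

-- ===== PRECONDITION & SPEC =====
def Spec_extract_claimed_actions_py (agent_response : String) (out : List String) : Prop := out = extract_claimed_actions_py_alt agent_response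
instance (agent_response : String) (out : List String) : Decidable (Spec_extract_claimed_actions_py agent_response out) := by unfold Spec_extract_claimed_actions_py; infer_instance

-- ===== CLAIM =====
def Claim_equal_extract_claimed_actions_py : Prop := ∀ (agent_response : String), Dom_extract_claimed_actions_py agent_response → Spec_extract_claimed_actions_py agent_response (extract_claimed_actions_py agent_response)

-- ===== LEMMAS AND PROOFS =====
theorem pvGoInfix (sep S : List Char) :
    ∀ (fuel : Nat) (l cur : List Char) (acc : List (List Char)),
      (cur.reverse ++ l) <:+: S → (∀ x ∈ acc, x <:+: S) →
      ∀ x ∈ PySem.Chars.splitOn.go sep fuel l cur acc, x <:+: S := by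
  intro fuel
  induction fuel with
  | zero =>
    intro l cur acc h1 h2 x hx
    simp [PySem.Chars.splitOn.go] at hx
    rcases hx with hx | hx
    · exact h2 x hx
    · exact hx ▸ h1
  | succ n ih =>
    intro l cur acc h1 h2 x hx
    rcases l with _ | ⟨c, rest⟩
    · simp [PySem.Chars.splitOn.go] at hx
      rcases hx with hx | hx
      · exact h2 x hx
      · subst hx; simpa using h1
    · rw [PySem.Chars.splitOn.go] at hx
      split at hx
      · refine ih _ _ _ ?_ ?_ x hx
        · exact (((List.drop_suffix _ _).trans (List.suffix_append _ _)).isInfix).trans h1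
        · intro y hy
          rcases List.mem_cons.mp hy with hy | hy
          · exact hy ▸ ((List.prefix_append _ _).isInfix).trans h1
          · exact h2 y hy
      · refine ih _ _ _ ?_ h2 x hx
        simpa using h1

theorem pvMemSplitOnInfix (S sep s : List Char) (h : s ∈ PySem.Chars.splitOn S sep) : s <:+: S := by
  refine pvGoInfix sep S (S.length+1) S [] [] (by simp) (by simp) s ?_
  simpa [PySem.Chars.splitOn] using h

def pvPats : List String :=
  ["i loaded", "i used", "i applied", "i analyzed", "i executed",
   "i ran", "i performed", "i implemented", "i called", "i invoked"]

def pvSents (agent_response : String) : List String :=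
  (PySem.Str.split? agent_response ".").getD []

def pvHits (agent_response pattern : String) : List String :=
  ((pvSents agent_response).filter
    (fun s => PySem.Str.isIn pattern (PySem.Str.lower s))).map PySem.Str.strip

theorem pvSents_infix (resp s : String) (hs : s ∈ pvSents resp) : s.toList <:+: resp.toList := by
  have hbr := PySem.Str.split?_map resp "."
  unfold pvSents at hs
  cases h : PySem.Str.split? resp "." with
  | none => rw [h] at hbr; simp [PySem.Chars.split?] at hbr
  | some l =>
    rw [h] at hs hbr
    simp at hs hbr
    apply pvMemSplitOnInfix resp.toList ['.']
    have h2 : s.toList ∈ l.map String.toList := List.mem_map_of_mem hs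
    simp [PySem.Chars.split?] at hbr
    rwa [hbr] at h2

theorem pvHits_nil (resp p : String)
    (h : ¬ PySem.Str.isIn p (PySem.Str.lower resp) = true) : pvHits resp p = [] := by
  unfold pvHits
  rw [List.filter_eq_nil_iff.mpr, List.map_nil]
  intro s hs hin
  apply h
  rw [PySem.Str.isIn_iff_infix] at hin ⊢
  rw [PySem.Str.toList_lower] at hin ⊢
  have hinf : (PySem.Chars.lower s.toList) <:+: (PySem.Chars.lower resp.toList) :=
    List.IsInfix.map PySem.Chars.lowerChar (pvSents_infix resp s hs)
  exact hin.trans hinf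

theorem pvFlatMapCongr {α β : Type} (l : List α) (f g : α → List β)
    (h : ∀ a ∈ l, f a = g a) : l.flatMap f = l.flatMap g := by
  induction l with
  | nil => rfl
  | cons x xs ih =>
    simp only [List.flatMap_cons]
    rw [h x (List.mem_cons_self), ih (fun a ha => h a (List.mem_cons_of_mem _ ha))]

theorem pvFlatMapIte (c : String → Bool) (f : String → String) (l : List String) :
    l.flatMap (fun s => if c s then [f s] else []) = (l.filter c).map f := by
  induction l with
  | nil => rfl
  | cons x xs ih =>
    by_cases h : c x <;> simp [h, ih]

theorem pvFilterBeqAnd (l : List String) (hl : l.Nodup) (p : String) (hp : p ∈ l)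
    (b : String → Bool) :
    l.filter (fun a => (a == p) && b a) = if b p then [p] else [] := by
  induction l with
  | nil => cases hp
  | cons x xs ih =>
    rcases List.mem_cons.mp hp with rfl | hp'
    · have hx : p ∉ xs := (List.nodup_cons.mp hl).1
      have hnil : xs.filter (fun a => (a == p) && b a) = [] := by
        apply List.filter_eq_nil_iff.mpr
        intro a ha hcond
        simp at hcond
        exact hx (hcond.1 ▸ ha)
      by_cases hb : b p <;> simp [hb, hnil]
    · have hx : x ≠ p := by
        rintro rfl; exact (List.nodup_cons.mp hl).1 hp'
      rw [List.filter_cons]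
      simp [hx]
      exact ih (List.nodup_cons.mp hl).2 hp'

theorem pvA_eq (resp : String) :
    extract_claimed_actions_py resp = pvPats.flatMap (pvHits resp) := by
  have hstep : ∀ (acc : List String) (pat : String), pat ∈ pvPats →
      (if PySem.Str.isIn pat (PySem.Str.lower resp) then
        List.foldl (fun acc s =>
          if PySem.Str.isIn pat (PySem.Str.lower s) then acc ++ [PySem.Str.strip s] else acc)
          acc (pvSents resp)
       else acc) = acc ++ pvHits resp pat := by
    intro acc pat _
    by_cases h : PySem.Str.isIn pat (PySem.Str.lower resp) = true
    · rw [if_pos h, PySem.List.foldl_append_if]; rfl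
    · rw [if_neg h, pvHits_nil resp pat h, List.append_nil]
  show List.foldl
      (fun claimed_actions pattern =>
        if PySem.Str.isIn pattern (PySem.Str.lower resp) then
          List.foldl
            (fun acc sentence =>
              if PySem.Str.isIn pattern (PySem.Str.lower sentence) then
                acc ++ [PySem.Str.strip sentence]
              else acc)
            claimed_actions (pvSents resp)
        else claimed_actions)
      [] pvPats = _
  rw [PySem.List.foldl_congr_mem _ _ _ _ hstep, PySem.List.foldl_append_eq_flatMap,
    List.nil_append]

theorem pvIndex_getD (resp p : String) (hp : p ∈ pvPats) :
    ((((pvSents resp).flatMap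
        (fun s => (pvPats.filter (fun q => PySem.Str.isIn q (PySem.Str.lower s))).map
          (fun q => (q, PySem.Str.strip s)))).foldl
        (fun d q => d.modify q.1 [] (fun v => v ++ [q.2])) PySem.Dict.empty).getD p [])
      = pvHits resp p := by
  rw [PySem.Dict.getD_foldl_modify_append, PySem.Dict.getD_empty, List.nil_append,
    List.filter_flatMap, List.map_flatMap]
  have hper : ∀ s ∈ pvSents resp,
      (List.map (fun (x : String × String) => x.2)
        (List.filter (fun (x : String × String) => x.1 == p)
          ((pvPats.filter (fun q => PySem.Str.isIn q (PySem.Str.lower s))).map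
            (fun q => (q, PySem.Str.strip s)))))
      = (if PySem.Str.isIn p (PySem.Str.lower s) then [PySem.Str.strip s] else []) := by
    intro s _
    rw [List.filter_map, List.filter_filter]
    have hfb := pvFilterBeqAnd pvPats (by decide) p hp
      (fun a => PySem.Str.isIn a (PySem.Str.lower s))
    simp only [Function.comp_def] at *
    rw [show (fun a => ((a, PySem.Str.strip s).1 == p) && PySem.Str.isIn a (PySem.Str.lower s))
        = (fun a => (a == p) && PySem.Str.isIn a (PySem.Str.lower s)) from rfl, hfb]
    split <;> rfl
  rw [pvFlatMapCongr _ _ _ hper, pvFlatMapIte]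
  rfl

set_option maxHeartbeats 1000000 in
theorem pvB_eq (resp : String) :
    extract_claimed_actions_py_alt resp = pvPats.flatMap (pvHits resp) := by
  have hpair : List.foldl
      (fun pairs sentence =>
        List.foldl
          (fun pairs pattern =>
            if PySem.Str.isIn pattern (PySem.Str.lower sentence) then
              pairs ++ [(pattern, PySem.Str.strip sentence)]
            else pairs)
          pairs pvPats)
      ([] : List (String × String)) (pvSents resp)
      = (pvSents resp).flatMap
          (fun s => (pvPats.filter (fun q => PySem.Str.isIn q (PySem.Str.lower s))).map
            (fun q => (q, PySem.Str.strip s))) := by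
    have h1 : ∀ (pairs : List (String × String)) (s : String), s ∈ pvSents resp →
        List.foldl
          (fun pairs pattern =>
            if PySem.Str.isIn pattern (PySem.Str.lower s) then
              pairs ++ [(pattern, PySem.Str.strip s)]
            else pairs)
          pairs pvPats
        = pairs ++ (pvPats.filter (fun q => PySem.Str.isIn q (PySem.Str.lower s))).map
            (fun q => (q, PySem.Str.strip s)) :=
      fun pairs s _ => PySem.List.foldl_append_if _ _ _ _
    rw [PySem.List.foldl_congr_mem _ _ _ _ h1, PySem.List.foldl_append_eq_flatMap,
      List.nil_append]
  simp only [extract_claimed_actions_py_alt]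
  rw [show (["i loaded", "i used", "i applied", "i analyzed", "i executed",
     "i ran", "i performed", "i implemented", "i called", "i invoked"] : List String)
      = pvPats from rfl,
    show (PySem.Str.split? resp ".").getD [] = pvSents resp from rfl]
  rw [hpair, PySem.List.foldl_append_eq_flatMap, List.nil_append]
  exact pvFlatMapCongr _ _ _ (fun p hp => pvIndex_getD resp p hp)

-- ===== VERDICT =====
theorem extract_claimed_actions_py_spec : Claim_equal_extract_claimed_actions_py := by
  intro agent_response _
  unfold Spec_extract_claimed_actions_py
  rw [pvA_eq, pvB_eq]
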